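-- pv_equiv track=rewrite | github.com/lycosa9527/MindGraph | loadtests/collab/locustfile.py | flatten_room_cards
-- ===== SOURCE A (Python) =====
-- from typing import List, Mapping, Tuple
--
-- def flatten_room_cards(
--     layout: List[Tuple[int, int]],
--     codes: List[str],
-- ) -> List[Tuple[str, int]]:
--     """
--     Pair each logical room code with seat weight / capacity notion.
--
--     For Locust weighted selection we only need ``(code, weight)``.
--     Weight = seats per-room for sizing probability mass.
--     """
--     cards: List[Tuple[str, int]] = []
--     code_index = 0
--     for room_count, seats in layout:
--         for _ in range(room_count):
--             if code_index >= len(codes):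
--                 raise ValueError(
--                     'Not enough COLLAB_CODES for WORKSHOP_SIZES segments'
--                 )
--             cards.append((codes[code_index], seats))
--             code_index += 1
--     if code_index != len(codes):
--         raise ValueError(
--             'Too many COLLAB_CODES for WORKSHOP_SIZES — trim extras '
--             f'(used {code_index}, got {len(codes)})'
--         )
--     return cards
-- ===== SOURCE B (Python) =====
-- from typing import List, Tuple
--
-- def flatten_room_cards(
--     layout: List[Tuple[int, int]],
--     codes: List[str],
-- ) -> List[Tuple[str, int]]:
--     weights = [seats for room_count, seats in layout for _ in range(room_count)]
--     if len(codes) < len(weights):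
--         raise ValueError(
--             'Not enough COLLAB_CODES for WORKSHOP_SIZES segments'
--         )
--     if len(codes) > len(weights):
--         raise ValueError(
--             'Too many COLLAB_CODES for WORKSHOP_SIZES — trim extras '
--             f'(used {len(weights)}, got {len(codes)})'
--         )
--     return list(zip(codes, weights))
-- ===== Notes on version B (the rewrite author's own statement) =====
-- stated objective: simpler
-- what changed: Replaces the interleaved index-tracking loop (index check and append per seat) with a flatten-then-zip decomposition: build the flat weight list, validate by comparing lengths once, then zip codes with weights.
import Mathlib
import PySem

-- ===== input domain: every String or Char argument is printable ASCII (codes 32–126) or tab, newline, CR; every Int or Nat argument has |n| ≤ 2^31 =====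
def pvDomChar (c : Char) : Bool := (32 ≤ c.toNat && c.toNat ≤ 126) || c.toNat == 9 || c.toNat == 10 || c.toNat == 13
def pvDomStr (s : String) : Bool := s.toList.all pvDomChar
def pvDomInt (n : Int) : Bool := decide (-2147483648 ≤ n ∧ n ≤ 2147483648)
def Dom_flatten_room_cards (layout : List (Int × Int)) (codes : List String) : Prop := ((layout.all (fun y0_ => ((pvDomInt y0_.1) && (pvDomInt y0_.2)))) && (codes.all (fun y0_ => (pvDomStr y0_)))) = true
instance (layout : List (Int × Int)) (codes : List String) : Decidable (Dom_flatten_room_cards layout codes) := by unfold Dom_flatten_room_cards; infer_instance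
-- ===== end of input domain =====

-- B replaces A's interleaved index-tracking loop with a flatten-then-zip decomposition (objective: simpler);
-- both raise on a length mismatch, so Pre_ admits exactly the inputs where A returns.

-- ===== PORT A =====
-- inner 'for _ in range(room_count)' loop of A; the 'raise ValueError' branch is unreachable under Pre_ (returns the state unchanged)
def pvGoRoomA (codes : List String) (seats : Int) : Nat → List (String × Int) × Nat → List (String × Int) × Nat
  | 0, st => st
  | n+1, (cards, idx) =>
      if codes.length ≤ idx then (cards, idx)   -- Python: raise ValueError('Not enough COLLAB_CODES …')
      else pvGoRoomA codes seats n (cards ++ [(((PySem.List.pyGet? codes (idx : Int)).getD ""), seats)], idx + 1)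

def flatten_room_cards (layout : List (Int × Int)) (codes : List String) : List (String × Int) :=
  let st := layout.foldl (fun st p => pvGoRoomA codes p.2 p.1.toNat st) (([] : List (String × Int)), 0)
  if st.2 ≠ codes.length then []   -- Python: raise ValueError('Too many COLLAB_CODES …')
  else st.1

-- ===== PORT B =====
def flatten_room_cards_alt (layout : List (Int × Int)) (codes : List String) : List (String × Int) :=
  let weights := layout.flatMap (fun p => List.replicate p.1.toNat p.2)
  if codes.length < weights.length then []        -- Python: raise ValueError('Not enough …')
  else if weights.length < codes.length then []   -- Python: raise ValueError('Too many …')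
  else codes.zip weights

-- ===== PRECONDITION & SPEC =====
-- Pre_ excludes exactly the inputs on which A raises ValueError: the total room count must equal the number of codes.
def Pre_flatten_room_cards (layout : List (Int × Int)) (codes : List String) : Prop :=
  (layout.map (fun p => p.1.toNat)).sum = codes.length
instance (layout : List (Int × Int)) (codes : List String) : Decidable (Pre_flatten_room_cards layout codes) := by unfold Pre_flatten_room_cards; infer_instance
def pvWitness_flatten_room_cards : (List (Int × Int)) × List String := ([(2, 5), (1, 3)], ["a", "b", "c"])

def Spec_flatten_room_cards (layout : List (Int × Int)) (codes : List String) (out : List (String × Int)) : Prop := out = flatten_room_cards_alt layout codes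
instance (layout : List (Int × Int)) (codes : List String) (out : List (String × Int)) : Decidable (Spec_flatten_room_cards layout codes out) := by unfold Spec_flatten_room_cards; infer_instance

-- ===== CLAIM (what is proved, stated in full; the proofs are below) =====
def Claim_equal_flatten_room_cards : Prop := ∀ (layout : List (Int × Int)) (codes : List String), Dom_flatten_room_cards layout codes → Pre_flatten_room_cards layout codes → Spec_flatten_room_cards layout codes (flatten_room_cards layout codes)

-- ===== LEMMAS AND PROOFS =====

theorem zip_append_split {α β : Type} (l : List α) (w1 w2 : List β) :
    l.zip (w1 ++ w2) = (l.take w1.length).zip w1 ++ (l.drop w1.length).zip w2 := by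
  induction w1 generalizing l with
  | nil => simp
  | cons b bs ih =>
    cases l with
    | nil => simp
    | cons a as => simp [ih]

theorem zip_replicate_eq_map {α β : Type} (l : List α) (a : β) (n : Nat) (h : n ≤ l.length) :
    (l.take n).zip (List.replicate n a) = (l.take n).map (fun x => (x, a)) := by
  induction n generalizing l with
  | zero => simp
  | succ m ih =>
    cases l with
    | nil => simp at h
    | cons x xs => simp_all [List.replicate_succ]

theorem pvGoRoomA_spec (codes : List String) (seats : Int) :
    ∀ (n idx : Nat) (cards : List (String × Int)), idx + n ≤ codes.length →
    pvGoRoomA codes seats n (cards, idx)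
      = (cards ++ ((codes.drop idx).take n).map (fun c => (c, seats)), idx + n) := by
  intro n
  induction n with
  | zero => intro idx cards h; simp [pvGoRoomA]
  | succ m ih =>
    intro idx cards h
    have hidx : idx < codes.length := by omega
    rw [pvGoRoomA, if_neg (by omega)]
    rw [ih (idx + 1) _ (by omega)]
    have hdrop : codes.drop idx = codes[idx] :: codes.drop (idx + 1) :=
      (List.getElem_cons_drop hidx).symm
    have hget : (PySem.List.pyGet? codes (idx : Int)).getD "" = codes[idx] := by
      simp [PySem.List.pyGet?, PySem.List.pyIdx?, hidx]
    rw [hget, hdrop]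
    simp only [List.take_succ_cons, List.map_cons, List.append_assoc, List.cons_append,
      List.nil_append, Prod.mk.injEq]
    exact ⟨trivial, by omega⟩

theorem foldA_spec (codes : List String) :
    ∀ (layout : List (Int × Int)) (idx : Nat) (cards : List (String × Int)),
    idx + (layout.map (fun p => p.1.toNat)).sum ≤ codes.length →
    layout.foldl (fun st p => pvGoRoomA codes p.2 p.1.toNat st) (cards, idx)
      = (cards ++ (codes.drop idx).zip (layout.flatMap (fun p => List.replicate p.1.toNat p.2)),
         idx + (layout.map (fun p => p.1.toNat)).sum) := by
  intro layout
  induction layout with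
  | nil => intro idx cards h; simp
  | cons p ps ih =>
    intro idx cards h
    simp only [List.map_cons, List.sum_cons] at h
    simp only [List.foldl_cons]
    rw [pvGoRoomA_spec codes p.2 p.1.toNat idx cards (by omega)]
    rw [ih (idx + p.1.toNat) _ (by omega)]
    simp only [List.flatMap_cons, zip_append_split, List.length_replicate,
      List.map_cons, List.sum_cons]
    rw [zip_replicate_eq_map _ _ _ (by simp; omega)]
    have hdd : List.drop p.1.toNat (List.drop idx codes) = List.drop (idx + p.1.toNat) codes := by
      rw [List.drop_drop, Nat.add_comm]
    simp only [hdd, List.append_assoc, Prod.mk.injEq]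
    exact ⟨trivial, by omega⟩

theorem flatMap_replicate_length (layout : List (Int × Int)) :
    (layout.flatMap (fun p => List.replicate p.1.toNat p.2)).length
      = (layout.map (fun p => p.1.toNat)).sum := by
  induction layout with
  | nil => rfl
  | cons p ps ih => simp [ih]

-- ===== VERDICT (by name: the statement is the Claim_ definition above) =====
theorem flatten_room_cards_spec : Claim_equal_flatten_room_cards := by
  intro layout codes _ hpre
  unfold Pre_flatten_room_cards at hpre
  unfold Spec_flatten_room_cards flatten_room_cards flatten_room_cards_alt
  rw [foldA_spec codes layout 0 [] (by omega)]
  simp only [flatMap_replicate_length, hpre]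
  simp
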